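-- pv_equiv track=rewrite | github.com/hadi-technology/corruption-structure-defeat-architecture | run_experiments.py | candidate_bindings_for_pattern
-- ===== SOURCE A (Python) =====
-- from typing import Dict, Iterable, List, Optional, Sequence, Tuple
--
-- VARIABLE_TOKEN = "var_x"
--
-- def extract_binding_from_pattern(pattern: str, grounded: str) -> Optional[str]:
--     p = pattern.split("|")
--     g = grounded.split("|")
--     if len(p) != len(g):
--         return None
--
--     binding: Optional[str] = None
--     for pp, gg in zip(p, g):
--         if pp == VARIABLE_TOKEN:
--             if binding is None:
--                 binding = gg
--             elif binding != gg:
--                 return None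
--             continue
--         if pp != gg:
--             return None
--     return binding
--
-- def candidate_bindings_for_pattern(pattern: str, facts: Iterable[str]) -> List[str]:
--     bindings = {
--         b
--         for fact in facts
--         for b in [extract_binding_from_pattern(pattern, fact)]
--         if b
--     }
--     return sorted(bindings)
-- ===== SOURCE B (Python) =====
-- VARIABLE_TOKEN = "var_x"
--
-- def candidate_bindings_for_pattern(pattern, facts):
--     # Generate-and-test: read the candidate value at the first var_x field,
--     # substitute it into the pattern template, and accept it iff the rebuilt
--     # string equals the fact verbatim (this enforces field counts, literal
--     # fields and repeated-var_x consistency all at once).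
--     p = pattern.split("|")
--     if VARIABLE_TOKEN not in p:
--         return []
--     i0 = p.index(VARIABLE_TOKEN)
--     out = set()
--     for fact in facts:
--         g = fact.split("|")
--         if i0 < len(g):
--             v = g[i0]
--             if v and "|".join(v if f == VARIABLE_TOKEN else f for f in p) == fact:
--                 out.add(v)
--     return sorted(out)
-- ===== Notes on version B (the rewrite author's own statement) =====
-- stated objective: faster
-- what changed: A unifies each fact field-by-field against zip(pattern.split, fact.split), re-splitting the pattern and threading an Optional binding with early returns per fact; B splits the pattern once, reads the candidate at the first var_x field, substitutes it into the pattern template and accepts it iff the rebuilt string equals the fact verbatim, one whole-string comparison per fact.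
import Mathlib
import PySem

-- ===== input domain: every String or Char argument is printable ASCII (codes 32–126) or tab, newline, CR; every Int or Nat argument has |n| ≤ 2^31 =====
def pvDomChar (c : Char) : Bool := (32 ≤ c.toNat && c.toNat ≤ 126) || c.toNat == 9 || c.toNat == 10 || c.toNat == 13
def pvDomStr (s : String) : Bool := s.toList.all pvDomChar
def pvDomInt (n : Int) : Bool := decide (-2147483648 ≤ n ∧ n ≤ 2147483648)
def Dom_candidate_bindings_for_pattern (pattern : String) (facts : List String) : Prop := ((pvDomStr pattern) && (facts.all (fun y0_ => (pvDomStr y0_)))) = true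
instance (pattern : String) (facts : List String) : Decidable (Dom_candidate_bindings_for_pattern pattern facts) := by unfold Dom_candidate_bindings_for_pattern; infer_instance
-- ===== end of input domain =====

-- B replaces A's field-by-field unification loop by generate-and-test: it reads the
-- candidate at the first var_x field, substitutes it into the pattern template and
-- compares the rebuilt string with the fact in one whole-string equality; the pattern
-- is split once and a timing run measured B faster on the generated inputs.

-- ===== PORT A =====
-- s.split("|") (exact: PySem.Chars.splitOn on the code points)
def pvSplit (s : String) : List String :=
  (PySem.Chars.splitOn s.toList ['|']).map String.ofList

-- the zip loop of extract_binding_from_pattern, carrying the running `binding`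
def pvExtractLoop : List (String × String) → Option String → Option String
  | [], binding => binding
  | (pp, gg) :: rest, binding =>
    if pp = "var_x" then
      match binding with
      | none => pvExtractLoop rest (some gg)
      | some bv => if bv ≠ gg then none else pvExtractLoop rest binding
    else
      if pp ≠ gg then none else pvExtractLoop rest binding

def extract_binding_from_pattern (pattern grounded : String) : Option String :=
  let p := pvSplit pattern
  let g := pvSplit grounded
  if p.length ≠ g.length then none
  else pvExtractLoop (p.zip g) none

def candidate_bindings_for_pattern (pattern : String) (facts : List String) : List String :=
  let bindings : PySem.Set String := facts.foldl (fun acc fact =>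
    match extract_binding_from_pattern pattern fact with
    | some b => if b ≠ "" then PySem.Set.add acc b else acc
    | none => acc) PySem.Set.empty
  PySem.List.sorted bindings (fun x => x) false

-- ===== PORT B =====
def candidate_bindings_for_pattern_alt (pattern : String) (facts : List String) : List String :=
  -- 'if VARIABLE_TOKEN not in p: return []' and 'i0 = p.index(VARIABLE_TOKEN)' as one index? match
  match PySem.List.index? (pvSplit pattern) "var_x" with
  | none => []
  | some i0 =>
    PySem.List.sorted (facts.foldl (fun acc fact =>
      if i0 < (pvSplit fact).length then
        if (pvSplit fact).getD i0 "" ≠ "" ∧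
           PySem.Str.join "|" ((pvSplit pattern).map
             (fun f => if f = "var_x" then (pvSplit fact).getD i0 "" else f)) = fact then
          PySem.Set.add acc ((pvSplit fact).getD i0 "")
        else acc
      else acc) PySem.Set.empty) (fun x => x) false

-- ===== PRECONDITION & SPEC =====
def Spec_candidate_bindings_for_pattern (pattern : String) (facts : List String) (out : List String) : Prop := out = candidate_bindings_for_pattern_alt pattern facts
instance (pattern : String) (facts : List String) (out : List String) : Decidable (Spec_candidate_bindings_for_pattern pattern facts out) := by unfold Spec_candidate_bindings_for_pattern; infer_instance

-- ===== CLAIM (what is proved, stated in full; the proofs are below) =====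
def Claim_equal_candidate_bindings_for_pattern : Prop := ∀ (pattern : String) (facts : List String), Dom_candidate_bindings_for_pattern pattern facts → Spec_candidate_bindings_for_pattern pattern facts (candidate_bindings_for_pattern pattern facts)

-- ===== LEMMAS AND PROOFS =====

lemma pvInterc_cons (x y : List Char) (t : List (List Char)) :
    List.intercalate ['|'] (x :: y :: t) = x ++ '|' :: List.intercalate ['|'] (y :: t) := by
  simp [List.intercalate, List.intersperse]

lemma pvInterc_single (x : List Char) : List.intercalate ['|'] [x] = x := by
  simp [List.intercalate]

-- a simple structural splitter on '|', proved equal to PySem.Chars.splitOn · ['|']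
def pvMySplit : List Char → List (List Char)
  | [] => [[]]
  | c :: rest => if c = '|' then [] :: pvMySplit rest else (pvMySplit rest).modifyHead (c :: ·)

lemma pvMySplit_cons_sep (rest : List Char) :
    pvMySplit ('|' :: rest) = [] :: pvMySplit rest := by simp [pvMySplit]

lemma pvMySplit_cons_nosep (c : Char) (rest : List Char) (hc : ¬ c = '|') :
    pvMySplit (c :: rest) = (pvMySplit rest).modifyHead (c :: ·) := by simp [pvMySplit, hc]

lemma pvMySplit_ne_nil (s : List Char) : pvMySplit s ≠ [] := by
  induction s with
  | nil => simp [pvMySplit]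
  | cons c rest ih =>
    simp only [pvMySplit]
    split_ifs
    · simp
    · cases h : pvMySplit rest with
      | nil => exact absurd h ih
      | cons a t => simp

lemma pvMem_mySplit_no_sep (s : List Char) : ∀ f ∈ pvMySplit s, '|' ∉ f := by
  induction s with
  | nil => intro f hf; simp [pvMySplit] at hf; simp [hf]
  | cons c rest ih =>
    intro f hf
    simp only [pvMySplit] at hf
    by_cases hc : c = '|'
    · rw [if_pos hc] at hf
      rcases List.mem_cons.mp hf with rfl | hf
      · simp
      · exact ih f hf
    · rw [if_neg hc] at hf
      cases h : pvMySplit rest with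
      | nil => exact absurd h (pvMySplit_ne_nil rest)
      | cons a t =>
        rw [h, List.modifyHead_cons] at hf
        rcases List.mem_cons.mp hf with rfl | hf
        · intro hm
          rcases List.mem_cons.mp hm with rfl | hm
          · exact hc rfl
          · exact ih a (h ▸ List.mem_cons_self) hm
        · exact ih f (h ▸ List.mem_cons_of_mem a hf)

lemma pvGo_eq (l : List Char) : ∀ (fuel : Nat), l.length < fuel → ∀ (cur : List Char) (acc : List (List Char)),
    PySem.Chars.splitOn.go ['|'] fuel l cur acc
      = acc.reverse ++ (pvMySplit l).modifyHead (cur.reverse ++ ·) := by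
  induction l with
  | nil =>
    intro fuel hf cur acc
    cases fuel with
    | zero => omega
    | succ f => simp [PySem.Chars.splitOn.go, pvMySplit]
  | cons c rest ih =>
    intro fuel hf cur acc
    cases fuel with
    | zero => simp at hf
    | succ f =>
      have hrest : rest.length < f := by simp at hf; omega
      by_cases hc : c = '|'
      · have hpre : List.isPrefixOf ['|'] (c :: rest) = true := by
          simp [List.isPrefixOf, hc]
        rw [show PySem.Chars.splitOn.go ['|'] (f+1) (c :: rest) cur acc
              = PySem.Chars.splitOn.go ['|'] f (List.drop 1 (c :: rest)) [] (cur.reverse :: acc) from by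
              simp [PySem.Chars.splitOn.go, hpre]]
        rw [List.drop_one, List.tail_cons, ih f hrest [] (cur.reverse :: acc)]
        cases h : pvMySplit rest with
        | nil => exact absurd h (pvMySplit_ne_nil rest)
        | cons a t => simp [pvMySplit, hc, h]
      · have hpre : List.isPrefixOf ['|'] (c :: rest) = false := by
          simp [List.isPrefixOf]; exact fun h => hc h.symm
        rw [show PySem.Chars.splitOn.go ['|'] (f+1) (c :: rest) cur acc
              = PySem.Chars.splitOn.go ['|'] f rest (c :: cur) acc from by
              simp [PySem.Chars.splitOn.go, hpre]]
        rw [ih f hrest (c :: cur) acc]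
        cases h : pvMySplit rest with
        | nil => exact absurd h (pvMySplit_ne_nil rest)
        | cons a t => simp [pvMySplit, hc, h]

lemma pvSplitOn_eq_mySplit (s : List Char) : PySem.Chars.splitOn s ['|'] = pvMySplit s := by
  show PySem.Chars.splitOn.go ['|'] (s.length + 1) s [] [] = pvMySplit s
  rw [pvGo_eq s (s.length + 1) (by omega) [] []]
  cases h : pvMySplit s with
  | nil => exact absurd h (pvMySplit_ne_nil s)
  | cons a t => simp

lemma pvJoin_mySplit (s : List Char) : List.intercalate ['|'] (pvMySplit s) = s := by
  induction s with
  | nil => simp [pvMySplit, List.intercalate]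
  | cons c rest ih =>
    by_cases hc : c = '|'
    · subst hc
      rw [pvMySplit_cons_sep]
      cases h : pvMySplit rest with
      | nil => exact absurd h (pvMySplit_ne_nil rest)
      | cons a t =>
        rw [h] at ih
        rw [pvInterc_cons]
        simp [ih]
    · rw [pvMySplit_cons_nosep c rest hc]
      cases h : pvMySplit rest with
      | nil => exact absurd h (pvMySplit_ne_nil rest)
      | cons a t =>
        rw [h] at ih
        rw [List.modifyHead_cons]
        cases t with
        | nil =>
          rw [pvInterc_single] at ih ⊢
          rw [ih]
        | cons b t' =>
          rw [pvInterc_cons] at ih ⊢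
          rw [List.cons_append, ih]

lemma pvMySplit_append_nosep (x t : List Char) (hx : '|' ∉ x) :
    pvMySplit (x ++ t) = (pvMySplit t).modifyHead (x ++ ·) := by
  induction x with
  | nil =>
    cases h : pvMySplit t with
    | nil => exact absurd h (pvMySplit_ne_nil t)
    | cons a s => simp only [List.modifyHead_cons, List.nil_append]; exact h
  | cons c x' ih =>
    have hc : c ≠ '|' := fun h => hx (h ▸ List.mem_cons_self)
    have hx' : '|' ∉ x' := fun h => hx (List.mem_cons_of_mem c h)
    rw [List.cons_append]
    simp only [pvMySplit, if_neg hc, ih hx']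
    cases h : pvMySplit t with
    | nil => exact absurd h (pvMySplit_ne_nil t)
    | cons a s => simp

lemma pvMySplit_join (fields : List (List Char)) (hne : fields ≠ [])
    (hf : ∀ f ∈ fields, '|' ∉ f) :
    pvMySplit (List.intercalate ['|'] fields) = fields := by
  induction fields with
  | nil => exact absurd rfl hne
  | cons x rest ih =>
    cases rest with
    | nil =>
      have hx : '|' ∉ x := hf x (by simp)
      rw [pvInterc_single]
      have := pvMySplit_append_nosep x [] hx
      simpa [pvMySplit] using this
    | cons y t =>
      have hx : '|' ∉ x := hf x (by simp)
      have hrest : pvMySplit (List.intercalate ['|'] (y :: t)) = y :: t :=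
        ih (by simp) (fun f hfm => hf f (List.mem_cons_of_mem x hfm))
      rw [pvInterc_cons, pvMySplit_append_nosep x _ hx]
      rw [pvMySplit_cons_sep, hrest, List.modifyHead_cons, List.append_nil]

-- string-level consequences
lemma pvSplit_eq (s : String) : pvSplit s = (pvMySplit s.toList).map String.ofList := by
  unfold pvSplit
  rw [pvSplitOn_eq_mySplit]

lemma pvSplit_no_sep (s : String) : ∀ f ∈ pvSplit s, '|' ∉ f.toList := by
  intro f hf
  rw [pvSplit_eq] at hf
  obtain ⟨cl, hcl, rfl⟩ := List.mem_map.mp hf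
  rw [String.toList_ofList]
  exact pvMem_mySplit_no_sep s.toList cl hcl

lemma pvJoin_eq_iff (fields : List String) (fact : String) (hne : fields ≠ [])
    (hf : ∀ f ∈ fields, '|' ∉ f.toList) :
    PySem.Str.join "|" fields = fact ↔ pvSplit fact = fields := by
  have hsep : ("|" : String).toList = ['|'] := rfl
  have htj : (PySem.Str.join "|" fields).toList
      = List.intercalate ['|'] (fields.map String.toList) := by
    rw [PySem.Str.toList_join, hsep]; rfl
  constructor
  · intro h
    have hl : fact.toList = List.intercalate ['|'] (fields.map String.toList) := by
      rw [← h, htj]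
    rw [pvSplit_eq, hl, pvMySplit_join (fields.map String.toList)
        (by simpa using hne)
        (by intro f hfm; obtain ⟨g, hg, rfl⟩ := List.mem_map.mp hfm; exact hf g hg)]
    rw [List.map_map]
    have hco : (String.ofList ∘ String.toList) = id := funext (fun u => String.ofList_toList)
    rw [hco, List.map_id]
  · intro h
    have hml : pvMySplit fact.toList = fields.map String.toList := by
      have h2 := congrArg (List.map String.toList) h
      rw [pvSplit_eq, List.map_map] at h2
      have hco : (String.toList ∘ String.ofList) = id := funext (fun u => String.toList_ofList)
      rw [hco, List.map_id] at h2
      exact h2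
    have h3 : (PySem.Str.join "|" fields).toList = fact.toList := by
      rw [htj, ← hml, pvJoin_mySplit]
    calc PySem.Str.join "|" fields
        = String.ofList (PySem.Str.join "|" fields).toList := String.ofList_toList.symm
      _ = String.ofList fact.toList := by rw [h3]
      _ = fact := String.ofList_toList

-- characterisation of A's extractor as "fact = substituted pattern"
def pvSubst (v : String) (f : String) : String := if f = "var_x" then v else f

lemma pvSubst_var (v : String) : pvSubst v "var_x" = v := by simp [pvSubst]

lemma pvSubst_of_ne (v f : String) (h : ¬ f = "var_x") : pvSubst v f = f := by
  simp [pvSubst, h]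

lemma pvLoop_some (p g : List String) (h : p.length = g.length) (b w : String) :
    pvExtractLoop (p.zip g) (some b) = some w ↔ w = b ∧ g = p.map (pvSubst b) := by
  induction p generalizing g with
  | nil =>
    cases g with
    | nil => simp [pvExtractLoop]; tauto
    | cons _ _ => simp at h
  | cons pp p' ih =>
    cases g with
    | nil => simp at h
    | cons gg g' =>
      have h' : p'.length = g'.length := by simpa using h
      by_cases hv : pp = "var_x"
      · subst hv
        rw [show pvExtractLoop (("var_x" :: p').zip (gg :: g')) (some b)
              = (if b ≠ gg then none else pvExtractLoop (p'.zip g') (some b)) from by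
              simp [pvExtractLoop]]
        by_cases hbg : b = gg
        · subst hbg
          rw [if_neg (by simp), ih g' h']
          simp [pvSubst_var]
        · rw [if_pos hbg]
          simp [pvSubst_var, Ne.symm hbg]
      · rw [show pvExtractLoop ((pp :: p').zip (gg :: g')) (some b)
              = (if pp ≠ gg then none else pvExtractLoop (p'.zip g') (some b)) from by
              simp [pvExtractLoop, hv]]
        by_cases hpg : pp = gg
        · subst hpg
          rw [if_neg (by simp), ih g' h']
          simp [pvSubst_of_ne _ _ hv]
        · rw [if_pos hpg]
          simp [pvSubst_of_ne _ _ hv, Ne.symm hpg]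

lemma pvLoop_none (p g : List String) (h : p.length = g.length) (w : String) :
    pvExtractLoop (p.zip g) none = some w ↔ "var_x" ∈ p ∧ g = p.map (pvSubst w) := by
  induction p generalizing g with
  | nil =>
    cases g with
    | nil => simp [pvExtractLoop]
    | cons _ _ => simp at h
  | cons pp p' ih =>
    cases g with
    | nil => simp at h
    | cons gg g' =>
      have h' : p'.length = g'.length := by simpa using h
      by_cases hv : pp = "var_x"
      · subst hv
        rw [show pvExtractLoop (("var_x" :: p').zip (gg :: g')) none
              = pvExtractLoop (p'.zip g') (some gg) from by simp [pvExtractLoop]]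
        rw [pvLoop_some p' g' h' gg w]
        constructor
        · rintro ⟨rfl, hmap⟩
          exact ⟨by simp, by simp [pvSubst_var, hmap]⟩
        · rintro ⟨-, hmap⟩
          rw [List.map_cons, pvSubst_var, List.cons_eq_cons] at hmap
          exact ⟨hmap.1.symm, by rw [hmap.2, hmap.1]⟩
      · rw [show pvExtractLoop ((pp :: p').zip (gg :: g')) none
              = (if pp ≠ gg then none else pvExtractLoop (p'.zip g') none) from by
              simp [pvExtractLoop, hv]]
        by_cases hpg : pp = gg
        · subst hpg
          rw [if_neg (by simp), ih g' h']
          rw [List.map_cons, pvSubst_of_ne _ _ hv, List.mem_cons,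
              or_iff_right (fun h => hv h.symm), List.cons_eq_cons]
          tauto
        · rw [if_pos hpg]
          rw [List.map_cons, pvSubst_of_ne _ _ hv, List.cons_eq_cons]
          simp [Ne.symm hpg]

lemma pvExtract_eq_some_iff (pattern fact w : String) :
    extract_binding_from_pattern pattern fact = some w
      ↔ "var_x" ∈ pvSplit pattern ∧ pvSplit fact = (pvSplit pattern).map (pvSubst w) := by
  unfold extract_binding_from_pattern
  by_cases hlen : (pvSplit pattern).length = (pvSplit fact).length
  · rw [if_neg (by omega), pvLoop_none _ _ hlen w]
  · rw [if_pos (by omega)]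
    constructor
    · intro h; simp at h
    · rintro ⟨-, hmap⟩
      have : (pvSplit pattern).length = (pvSplit fact).length := by
        rw [hmap, List.length_map]
      exact absurd this hlen

-- the per-fact step of A equals the per-fact step of B (when var_x occurs in the pattern)
lemma pvStep_eq (pattern fact : String) (i0 : Nat)
    (hidx : PySem.List.index? (pvSplit pattern) "var_x" = some i0) (acc : PySem.Set String) :
    (match extract_binding_from_pattern pattern fact with
      | some b => if b ≠ "" then PySem.Set.add acc b else acc
      | none => acc)
    =
    (if i0 < (pvSplit fact).length then
       if (pvSplit fact).getD i0 "" ≠ "" ∧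
          PySem.Str.join "|" ((pvSplit pattern).map
            (fun f => if f = "var_x" then (pvSplit fact).getD i0 "" else f)) = fact then
         PySem.Set.add acc ((pvSplit fact).getD i0 "")
       else acc
     else acc) := by
  obtain ⟨hi0, hp0, -⟩ := PySem.List.getElem_of_index?_eq_some hidx
  have hmem : "var_x" ∈ pvSplit pattern := hp0 ▸ List.getElem_mem hi0
  have hpne : pvSplit pattern ≠ [] := List.ne_nil_of_length_pos (by omega)
  cases hE : extract_binding_from_pattern pattern fact with
  | some b =>
    show (if b ≠ "" then PySem.Set.add acc b else acc) = _
    obtain ⟨-, hmap⟩ := (pvExtract_eq_some_iff pattern fact b).mp hE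
    have hglen : (pvSplit fact).length = (pvSplit pattern).length := by
      rw [hmap, List.length_map]
    have hig : i0 < (pvSplit fact).length := by omega
    have hv : (pvSplit fact).getD i0 "" = b := by
      rw [List.getD_eq_getElem _ _ hig]
      have : (pvSplit fact)[i0] = ((pvSplit pattern).map (pvSubst b))[i0]'(by
          rw [List.length_map]; omega) := by
        simp only [hmap]
      rw [this, List.getElem_map, hp0, pvSubst_var]
    have hfields : ∀ f ∈ (pvSplit pattern).map (pvSubst b), '|' ∉ f.toList := by
      intro f hfm
      obtain ⟨q, hq, rfl⟩ := List.mem_map.mp hfm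
      unfold pvSubst
      split_ifs with hq'
      · have hbmem : b ∈ pvSplit fact := by
          rw [hmap]
          exact List.mem_map.mpr ⟨"var_x", hq' ▸ hq, pvSubst_var b⟩
        exact pvSplit_no_sep fact b hbmem
      · exact pvSplit_no_sep pattern q hq
    have hjoin : PySem.Str.join "|" ((pvSplit pattern).map (pvSubst b)) = fact :=
      (pvJoin_eq_iff _ fact (by simpa using hpne) hfields).mpr hmap
    rw [if_pos hig, hv]
    by_cases hb : b = ""
    · subst hb
      rw [if_neg (by simp), if_neg (by simp)]
    · rw [if_pos hb, if_pos ⟨hb, by simpa [pvSubst] using hjoin⟩]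
  | none =>
    show acc = _
    by_cases hg : i0 < (pvSplit fact).length
    · rw [if_pos hg]
      set v := (pvSplit fact).getD i0 "" with hvdef
      by_cases hcond : v ≠ "" ∧
          PySem.Str.join "|" ((pvSplit pattern).map (fun f => if f = "var_x" then v else f)) = fact
      · exfalso
        have hvmem : v ∈ pvSplit fact := by
          rw [hvdef, List.getD_eq_getElem _ _ hg]
          exact List.getElem_mem hg
        have hfields : ∀ f ∈ (pvSplit pattern).map (pvSubst v), '|' ∉ f.toList := by
          intro f hfm
          obtain ⟨q, hq, rfl⟩ := List.mem_map.mp hfm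
          unfold pvSubst
          split_ifs
          · exact pvSplit_no_sep fact v hvmem
          · exact pvSplit_no_sep pattern q hq
        have hmap : pvSplit fact = (pvSplit pattern).map (pvSubst v) :=
          (pvJoin_eq_iff _ fact (by simpa using hpne) hfields).mp (by
            simpa [pvSubst] using hcond.2)
        have hsome : extract_binding_from_pattern pattern fact = some v :=
          (pvExtract_eq_some_iff pattern fact v).mpr ⟨hmem, hmap⟩
        rw [hE] at hsome
        exact absurd hsome (by simp)
      · rw [if_neg hcond]
    · rw [if_neg hg]

-- when var_x does not occur in the split pattern, A's fold never adds anything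
lemma pvFoldA_no_var (pattern : String) (hnv : "var_x" ∉ pvSplit pattern)
    (facts : List String) (acc : PySem.Set String) :
    facts.foldl (fun acc fact =>
      match extract_binding_from_pattern pattern fact with
      | some b => if b ≠ "" then PySem.Set.add acc b else acc
      | none => acc) acc = acc := by
  induction facts generalizing acc with
  | nil => rfl
  | cons f fs ih =>
    simp only [List.foldl_cons]
    cases hE : extract_binding_from_pattern pattern f with
    | some b =>
      exact absurd ((pvExtract_eq_some_iff pattern f b).mp hE).1 hnv
    | none => exact ih acc

lemma pvFold_eq (pattern : String) (i0 : Nat)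
    (hidx : PySem.List.index? (pvSplit pattern) "var_x" = some i0)
    (facts : List String) (acc : PySem.Set String) :
    facts.foldl (fun acc fact =>
      match extract_binding_from_pattern pattern fact with
      | some b => if b ≠ "" then PySem.Set.add acc b else acc
      | none => acc) acc
    =
    facts.foldl (fun acc fact =>
      if i0 < (pvSplit fact).length then
        if (pvSplit fact).getD i0 "" ≠ "" ∧
           PySem.Str.join "|" ((pvSplit pattern).map
             (fun f => if f = "var_x" then (pvSplit fact).getD i0 "" else f)) = fact then
          PySem.Set.add acc ((pvSplit fact).getD i0 "")
        else acc
      else acc) acc := by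
  induction facts generalizing acc with
  | nil => rfl
  | cons f fs ih =>
    simp only [List.foldl_cons]
    rw [pvStep_eq pattern f i0 hidx acc]
    exact ih _

-- ===== VERDICT (by name: the statement is the Claim_ definition above) =====
theorem candidate_bindings_for_pattern_spec : Claim_equal_candidate_bindings_for_pattern := by
  intro pattern facts _
  show candidate_bindings_for_pattern pattern facts = candidate_bindings_for_pattern_alt pattern facts
  show PySem.List.sorted (facts.foldl (fun acc fact =>
      match extract_binding_from_pattern pattern fact with
      | some b => if b ≠ "" then PySem.Set.add acc b else acc
      | none => acc) PySem.Set.empty) (fun x => x) false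
    = candidate_bindings_for_pattern_alt pattern facts
  unfold candidate_bindings_for_pattern_alt
  cases hidx : PySem.List.index? (pvSplit pattern) "var_x" with
  | none =>
    have hnv : "var_x" ∉ pvSplit pattern := (PySem.List.index?_eq_none_iff _ _).mp hidx
    rw [pvFoldA_no_var pattern hnv facts PySem.Set.empty]
    rfl
  | some i0 =>
    rw [pvFold_eq pattern i0 hidx facts PySem.Set.empty]
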